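-- pv_equiv track=rewrite | github.com/smileostrich/algorithm-practice | problemSolving/others/del9/p1.py | solution
-- ===== SOURCE A (Python) =====
-- def solution(student, k):
--     cnt = 0
--     for i in range(0,len(student)):
--         s_cnt = 0
--         cur = i
--         while cur < len(student):
--             if student[cur] == 1:
--                 s_cnt += 1
--                 if s_cnt == k:
--                     cnt += 1
--                 elif s_cnt > k:
--                     break
--             elif s_cnt == k:
--                 cnt += 1
--             cur += 1
--     return cnt
-- ===== SOURCE B (Python) =====
-- def solution(student, k):
--     # prefix-count-of-ones hashing: one pass, O(n) instead of A's O(n^2)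
--     freq = {0: 1}
--     p = 0
--     ans = 0
--     for x in student:
--         p += 1 if x == 1 else 0
--         ans += freq.get(p - k, 0)
--         freq[p] = freq.get(p, 0) + 1
--     return ans
-- ===== Notes on version B (the rewrite author's own statement) =====
-- stated objective: faster
-- what changed: Replaced the quadratic all-starts inner scan with a single pass that hashes prefix counts of ones and adds freq[p-k] per element.
import Mathlib
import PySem

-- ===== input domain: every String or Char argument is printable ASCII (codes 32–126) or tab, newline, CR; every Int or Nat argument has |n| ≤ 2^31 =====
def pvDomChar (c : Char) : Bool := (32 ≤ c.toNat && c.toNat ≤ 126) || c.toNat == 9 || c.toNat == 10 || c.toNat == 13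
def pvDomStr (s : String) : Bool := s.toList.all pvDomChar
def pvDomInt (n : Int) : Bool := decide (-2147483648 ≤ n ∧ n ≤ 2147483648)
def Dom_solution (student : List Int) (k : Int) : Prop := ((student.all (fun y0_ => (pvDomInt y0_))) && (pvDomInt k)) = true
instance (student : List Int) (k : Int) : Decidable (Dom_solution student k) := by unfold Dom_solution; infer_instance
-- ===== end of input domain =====

-- B replaces A's quadratic all-starting-points scan by one pass over a hash of prefix one-counts; return values proved equal on all inputs.

-- ===== PORT A =====
-- inner while loop of A: walks the suffix, s_cnt = running count of ones, cnt = accumulator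
def solutionInner (k : Int) : List Int → Int → Int → Int
  | [], _, cnt => cnt
  | x :: rest, s_cnt, cnt =>
    if x = 1 then
      if s_cnt + 1 = k then solutionInner k rest (s_cnt + 1) (cnt + 1)
      else if s_cnt + 1 > k then cnt
      else solutionInner k rest (s_cnt + 1) cnt
    else if s_cnt = k then solutionInner k rest s_cnt (cnt + 1)
    else solutionInner k rest s_cnt cnt

-- outer for loop of A: one inner run per starting index i (= per suffix)
def solutionOuter (k : Int) : List Int → Int → Int
  | [], cnt => cnt
  | x :: rest, cnt => solutionOuter k rest (solutionInner k (x :: rest) 0 cnt)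

def solution (student : List Int) (k : Int) : Int := solutionOuter k student 0

-- ===== PORT B =====
-- state: (p = count of ones so far, freq = dict counting all prefix one-counts seen, ans)
def solution_alt (student : List Int) (k : Int) : Int :=
  (student.foldl
    (fun st x =>
      let p := st.1 + (if x = 1 then (1 : Int) else 0)
      let a := st.2.2 + st.2.1.getD (p - k) 0
      (p, st.2.1.insert p (st.2.1.getD p 0 + 1), a))
    (0, PySem.Dict.ofList [((0 : Int), (1 : Int))], 0)).2.2

-- ===== PRECONDITION & SPEC =====
def Spec_solution (student : List Int) (k : Int) (out : Int) : Prop := out = solution_alt student k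
instance (student : List Int) (k : Int) (out : Int) : Decidable (Spec_solution student k out) := by unfold Spec_solution; infer_instance

-- ===== CLAIM (what is proved, stated in full; the proofs are below) =====
def Claim_equal_solution : Prop := ∀ (student : List Int) (k : Int), Dom_solution student k → Spec_solution student k (solution student k)

-- ===== LEMMAS AND PROOFS =====

-- indicator of a "one"
def pvInd (x : Int) : Int := if x = 1 then 1 else 0

-- number of ones in a list
def pvOnes : List Int → Int
  | [] => 0
  | x :: r => pvInd x + pvOnes r

-- number of nonempty prefixes of l whose running one-count, started at s, equals k
def pvCntPref (s k : Int) : List Int → Int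
  | [] => 0
  | x :: r => (if s + pvInd x = k then 1 else 0) + pvCntPref (s + pvInd x) k r

-- reference value: sum of pvCntPref over all suffixes = number of subarrays with exactly k ones
def pvAT (k : Int) : List Int → Int
  | [] => 0
  | x :: r => pvCntPref 0 k (x :: r) + pvAT k r

-- running prefix one-counts, starting value s included
def pvPrefsFrom (s : Int) : List Int → List Int
  | [] => [s]
  | x :: r => s :: pvPrefsFrom (s + pvInd x) r

-- B's loop body, let-free (definitionally equal to the lambda in solution_alt)
def pvStep (k : Int) (st : Int × PySem.Dict Int Int × Int) (x : Int) : Int × PySem.Dict Int Int × Int :=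
  (st.1 + (if x = 1 then (1 : Int) else 0),
   st.2.1.insert (st.1 + (if x = 1 then (1 : Int) else 0)) (st.2.1.getD (st.1 + (if x = 1 then (1 : Int) else 0)) 0 + 1),
   st.2.2 + st.2.1.getD (st.1 + (if x = 1 then (1 : Int) else 0) - k) 0)

theorem pvOnes_append (a b : List Int) : pvOnes (a ++ b) = pvOnes a + pvOnes b := by
  induction a with
  | nil => simp [pvOnes]
  | cons x r ih => simp [pvOnes, ih]; ring

theorem pvCntPref_zero (s k : Int) (l : List Int) (h : k < s) : pvCntPref s k l = 0 := by
  induction l generalizing s with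
  | nil => rfl
  | cons x r ih =>
    have hind : (0:Int) ≤ pvInd x := by unfold pvInd; split <;> omega
    simp only [pvCntPref]
    rw [if_neg (by omega), ih (s + pvInd x) (by omega)]
    ring

theorem pvInner_eq (k : Int) (l : List Int) : ∀ s cnt, solutionInner k l s cnt = cnt + pvCntPref s k l := by
  induction l with
  | nil => intro s cnt; simp [solutionInner, pvCntPref]
  | cons x r ih =>
    intro s cnt
    simp only [solutionInner, pvCntPref, pvInd]
    split_ifs <;>
      first
        | (exfalso; omega)
        | (rw [ih]; ring)
        | (rw [pvCntPref_zero _ _ _ (by omega)]; ring)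

theorem pvOuter_eq (k : Int) (l : List Int) : ∀ cnt, solutionOuter k l cnt = cnt + pvAT k l := by
  induction l with
  | nil => intro cnt; simp [solutionOuter, pvAT]
  | cons x r ih =>
    intro cnt
    simp only [solutionOuter, pvAT, ih, pvInner_eq]
    ring

theorem solution_eq_pvAT (student : List Int) (k : Int) : solution student k = pvAT k student := by
  simp [solution, pvOuter_eq]

-- counting in a shifted prefs list
theorem pvPrefsFrom_count (u : List Int) : ∀ s t : Int, (pvPrefsFrom s u).count t = (pvPrefsFrom 0 u).count (t - s) := by
  induction u with
  | nil =>
    intro s t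
    simp only [pvPrefsFrom, List.count_singleton, beq_iff_eq]
    by_cases h : t = s
    · rw [if_pos (by omega : s = t), if_pos (by omega : (0:Int) = t - s)]
    · rw [if_neg (by omega : ¬ s = t), if_neg (by omega : ¬ (0:Int) = t - s)]
  | cons x r ih =>
    intro s t
    simp only [pvPrefsFrom, List.count_cons, beq_iff_eq]
    rw [ih (s + pvInd x) t, ih (0 + pvInd x) (t - s)]
    have h1 : t - (s + pvInd x) = t - s - (0 + pvInd x) := by ring
    rw [h1]
    congr 1
    by_cases h : t = s
    · rw [if_pos (by omega : s = t), if_pos (by omega : (0:Int) = t - s)]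
    · rw [if_neg (by omega : ¬ s = t), if_neg (by omega : ¬ (0:Int) = t - s)]

theorem pvCntPref_append (t : List Int) (x : Int) : ∀ s k : Int, pvCntPref s k (t ++ [x]) = pvCntPref s k t + (if s + pvOnes t + pvInd x = k then 1 else 0) := by
  induction t with
  | nil => intro s k; simp [pvCntPref, pvOnes]
  | cons y r ih =>
    intro s k
    simp only [List.cons_append, pvCntPref, ih, pvOnes]
    by_cases h : s + pvInd y + pvOnes r + pvInd x = k
    · rw [if_pos h, if_pos (by omega : s + (pvInd y + pvOnes r) + pvInd x = k)]; ring
    · rw [if_neg h, if_neg (by omega : ¬ s + (pvInd y + pvOnes r) + pvInd x = k)]; ring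

-- KEY: appending one element adds exactly the number of earlier prefix counts equal to the new target
theorem pvAT_append (k : Int) (u : List Int) (x : Int) :
    pvAT k (u ++ [x]) = pvAT k u + ((pvPrefsFrom 0 u).count (pvOnes u + pvInd x - k) : Int) := by
  induction u with
  | nil =>
    simp only [List.nil_append, pvAT, pvCntPref, pvOnes, pvPrefsFrom, List.count_singleton, beq_iff_eq]
    push_cast
    by_cases h : (0:Int) + pvInd x = k
    · rw [if_pos h, if_pos (by omega : (0:Int) = 0 + pvInd x - k)]; ring
    · rw [if_neg h, if_neg (by omega : ¬ (0:Int) = 0 + pvInd x - k)]; ring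
  | cons y r ih =>
    have h1 : pvAT k ((y :: r) ++ [x]) = pvCntPref 0 k (y :: (r ++ [x])) + pvAT k (r ++ [x]) := rfl
    have h2 : pvCntPref 0 k (y :: (r ++ [x])) = (if 0 + pvInd y = k then 1 else 0) + pvCntPref (0 + pvInd y) k (r ++ [x]) := rfl
    have h3 : pvAT k (y :: r) = pvCntPref 0 k (y :: r) + pvAT k r := rfl
    have h4 : pvCntPref 0 k (y :: r) = (if 0 + pvInd y = k then 1 else 0) + pvCntPref (0 + pvInd y) k r := rfl
    have h5 : pvPrefsFrom 0 (y :: r) = 0 :: pvPrefsFrom (0 + pvInd y) r := rfl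
    have h6 : pvOnes (y :: r) = pvInd y + pvOnes r := rfl
    rw [h1, h2, pvCntPref_append, ih, h3, h4, h5, h6, List.count_cons, pvPrefsFrom_count r (0 + pvInd y)]
    have h7 : pvInd y + pvOnes r + pvInd x - k - (0 + pvInd y) = pvOnes r + pvInd x - k := by ring
    rw [h7]
    simp only [beq_iff_eq]
    push_cast
    split_ifs <;> omega

-- prefs of u ++ [x] appends the new total
theorem pvPrefsFrom_append (u : List Int) (x : Int) : ∀ s : Int, pvPrefsFrom s (u ++ [x]) = pvPrefsFrom s u ++ [s + pvOnes (u ++ [x])] := by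
  induction u with
  | nil => intro s; simp [pvPrefsFrom, pvOnes]
  | cons y r ih =>
    intro s
    simp only [List.cons_append, pvPrefsFrom, ih, pvOnes]
    rw [add_assoc]

-- counter of a list of Ints via the insert/getD loop (= B's dict maintenance)
def pvCounterOf (xs : List Int) : PySem.Dict Int Int :=
  xs.foldl (fun d x => d.insert x (d.getD x 0 + 1)) PySem.Dict.empty

theorem pvCounterOf_getD (xs : List Int) (v : Int) : (pvCounterOf xs).getD v 0 = (xs.count v : Int) := by
  rw [pvCounterOf, PySem.Dict.foldl_insert_getD_add_one_eq_counter, PySem.Dict.getD_counter]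

theorem pvCounterOf_append_singleton (xs : List Int) (v : Int) :
    pvCounterOf (xs ++ [v]) = (pvCounterOf xs).insert v ((pvCounterOf xs).getD v 0 + 1) := by
  simp [pvCounterOf, List.foldl_append]

-- B's loop invariant: folding the remaining list v from the state of a processed prefix u
theorem pvFoldB_inv (k : Int) (v : List Int) : ∀ u : List Int,
    (v.foldl (pvStep k) (pvOnes u, pvCounterOf (pvPrefsFrom 0 u), pvAT k u))
    = (pvOnes (u ++ v), pvCounterOf (pvPrefsFrom 0 (u ++ v)), pvAT k (u ++ v)) := by
  induction v with
  | nil => intro u; simp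
  | cons x r ih =>
    intro u
    have hp : pvOnes u + (if x = 1 then (1:Int) else 0) = pvOnes (u ++ [x]) := by
      rw [pvOnes_append]; simp [pvOnes, pvInd]
    have hstep : pvStep k (pvOnes u, pvCounterOf (pvPrefsFrom 0 u), pvAT k u) x
        = (pvOnes (u ++ [x]), pvCounterOf (pvPrefsFrom 0 (u ++ [x])), pvAT k (u ++ [x])) := by
      simp only [pvStep, hp]
      refine Prod.ext rfl (Prod.ext ?_ ?_)
      · -- dict component
        show (pvCounterOf (pvPrefsFrom 0 u)).insert (pvOnes (u ++ [x]))
              ((pvCounterOf (pvPrefsFrom 0 u)).getD (pvOnes (u ++ [x])) 0 + 1)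
            = pvCounterOf (pvPrefsFrom 0 (u ++ [x]))
        rw [pvPrefsFrom_append u x 0, zero_add, pvCounterOf_append_singleton]
      · -- answer component
        show pvAT k u + (pvCounterOf (pvPrefsFrom 0 u)).getD (pvOnes (u ++ [x]) - k) 0 = pvAT k (u ++ [x])
        rw [pvCounterOf_getD, pvAT_append]
        have h1 : pvOnes (u ++ [x]) - k = pvOnes u + pvInd x - k := by
          rw [pvOnes_append]; simp [pvOnes]
        rw [h1]
    rw [List.foldl_cons, hstep, ih (u ++ [x])]
    simp


theorem solution_alt_eq_pvAT (student : List Int) (k : Int) : solution_alt student k = pvAT k student := by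
  have h := pvFoldB_inv k student []
  simp only [List.nil_append] at h
  show (student.foldl (pvStep k) (pvOnes [], pvCounterOf (pvPrefsFrom 0 []), pvAT k [])).2.2 = pvAT k student
  rw [h]

-- ===== VERDICT (by name: the statement is the Claim_ definition above) =====
theorem solution_spec : Claim_equal_solution := by
  intro student k _
  unfold Spec_solution
  rw [solution_eq_pvAT, solution_alt_eq_pvAT]
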